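-- pv_equiv track=rewrite | github.com/JimboJimbabwe/Information-Technology | InfoTech/Data Science/XML Manipulation/xml2Curltwo.py | format_request
-- ===== SOURCE A (Python) =====
-- def format_request(decoded_request):
--     # Split the request into lines, preserving original line breaks
--     lines = decoded_request.split('\r\n')
--
--     # Reconstruct the request, ensuring we don't add extra line breaks
--     formatted_lines = []
--     headers_done = False
--     for line in lines:
--         if not headers_done:
--             formatted_lines.append(line)
--             if line.strip() == '':
--                 headers_done = True
--         else:
--             # For the body, we append without adding extra newlines
--             formatted_lines.append(line.strip())
--
--     # Join the lines using CRLF (Carriage Return + Line Feed)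
--     return '\r\n'.join(formatted_lines)
-- ===== SOURCE B (Python) =====
-- def format_request(decoded_request):
--     lines = decoded_request.split('\r\n')
--     sep = next((i for i, l in enumerate(lines) if l.strip() == ''), None)
--     if sep is None:
--         return '\r\n'.join(lines)
--     return '\r\n'.join(lines[:sep + 1] + [l.strip() for l in lines[sep + 1:]])
-- ===== Notes on version B (the rewrite author's own statement) =====
-- stated objective: simpler
-- what changed: Replaces the stateful flag-driven accumulator loop by a single search for the first blank-separator line followed by slicing: headers kept verbatim, body lines mapped through strip.
import Mathlib
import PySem

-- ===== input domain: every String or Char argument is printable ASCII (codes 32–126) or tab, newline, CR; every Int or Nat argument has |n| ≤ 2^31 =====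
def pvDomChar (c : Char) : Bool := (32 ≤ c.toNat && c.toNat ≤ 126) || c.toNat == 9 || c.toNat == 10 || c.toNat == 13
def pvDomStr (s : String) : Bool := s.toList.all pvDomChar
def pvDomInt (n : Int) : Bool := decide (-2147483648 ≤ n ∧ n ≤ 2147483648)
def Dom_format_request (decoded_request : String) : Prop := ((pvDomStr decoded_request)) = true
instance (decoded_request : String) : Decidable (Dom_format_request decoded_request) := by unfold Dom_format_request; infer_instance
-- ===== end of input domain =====

-- B replaces A's flag-driven accumulator loop by finding the first blank separator line
-- and mapping strip over the body slice only (objective: simpler; return value only, no mutation).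

-- ===== PORT A =====
def format_request (decoded_request : String) : String :=
  let lines := (PySem.Str.split? decoded_request "\r\n").getD []
  let res := lines.foldl (fun st line =>
    if st.2 = false then
      (st.1 ++ [line], if PySem.Str.strip line == "" then true else st.2)
    else
      (st.1 ++ [PySem.Str.strip line], st.2)) (([] : List String), false)
  PySem.Str.join "\r\n" res.1

-- ===== PORT B =====
def format_request_alt (decoded_request : String) : String :=
  let lines := (PySem.Str.split? decoded_request "\r\n").getD []
  match lines.findIdx? (fun l => PySem.Str.strip l == "") with
  | none => PySem.Str.join "\r\n" lines
  | some sep =>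
      PySem.Str.join "\r\n"
        (PySem.List.slice lines none (some ((sep : Int) + 1)) ++
         (PySem.List.slice lines (some ((sep : Int) + 1)) none).map PySem.Str.strip)

-- ===== PRECONDITION & SPEC =====
def Spec_format_request (decoded_request : String) (out : String) : Prop := out = format_request_alt decoded_request
instance (decoded_request : String) (out : String) : Decidable (Spec_format_request decoded_request out) := by unfold Spec_format_request; infer_instance

-- ===== CLAIM (what is proved, stated in full; the proofs are below) =====
def Claim_equal_format_request : Prop := ∀ (decoded_request : String), Dom_format_request decoded_request → Spec_format_request decoded_request (format_request decoded_request)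

-- ===== LEMMAS AND PROOFS =====

def pvStep (st : List String × Bool) (line : String) : List String × Bool :=
  if st.2 = false then
    (st.1 ++ [line], if PySem.Str.strip line == "" then true else st.2)
  else
    (st.1 ++ [PySem.Str.strip line], st.2)

lemma pvFoldl_true (ls : List String) (acc : List String) :
    ls.foldl pvStep (acc, true) = (acc ++ ls.map PySem.Str.strip, true) := by
  induction ls generalizing acc with
  | nil => simp
  | cons l ls ih => simp [pvStep, ih, List.append_assoc]

lemma pvFoldl_false (ls : List String) (acc : List String) :
    (ls.foldl pvStep (acc, false)).1 =
      acc ++ (match ls.findIdx? (fun l => PySem.Str.strip l == "") with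
        | none => ls
        | some i => ls.take (i + 1) ++ (ls.drop (i + 1)).map PySem.Str.strip) := by
  induction ls generalizing acc with
  | nil => simp
  | cons l ls ih =>
    by_cases h : PySem.Str.strip l == ""
    · simp [pvStep, h, List.findIdx?_cons, pvFoldl_true]
    · have := ih (acc ++ [l])
      simp only [List.foldl_cons, pvStep, h, if_false, Bool.false_eq_true, if_true] at this ⊢
      rw [this]
      cases hf : ls.findIdx? (fun l => PySem.Str.strip l == "") with
      | none => simp [List.findIdx?_cons, h, hf]
      | some i => simp [List.findIdx?_cons, h, hf, List.append_assoc]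

-- ===== VERDICT (by name: the statement is the Claim_ definition above) =====
theorem format_request_spec : Claim_equal_format_request := by
  intro s _
  unfold Spec_format_request format_request format_request_alt
  simp only []
  rw [show (fun st line => if st.2 = false then
        (st.1 ++ [line], if PySem.Str.strip line == "" then true else st.2)
      else (st.1 ++ [PySem.Str.strip line], st.2) : List String × Bool → String → List String × Bool) = pvStep
      from rfl]
  rw [pvFoldl_false]
  cases hf : ((PySem.Str.split? s "\r\n").getD []).findIdx? (fun l => PySem.Str.strip l == "") with
  | none => simp
  | some i =>
    simp only [List.nil_append,
      PySem.List.slice_to _ (show (0:Int) ≤ (i:Int) + 1 by positivity),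
      PySem.List.slice_from _ (show (0:Int) ≤ (i:Int) + 1 by positivity)]
    norm_num
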